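-- pv_equiv track=rewrite | github.com/namin/dafny-sketcher | vfp/bench_case_repair_paradox.py | extract_lemma_signatures
-- ===== SOURCE A (Python) =====
-- def extract_lemma_signatures(program: str) -> str:
--     """Return a formatted string of every lemma signature in *program*."""
--     lines = program.splitlines()
--     sigs: list[str] = []
--     i = 0
--     while i < len(lines):
--         stripped = lines[i].strip()
--         if stripped.startswith('lemma ') or stripped.startswith('lemma{'):
--             sig_lines = [lines[i].rstrip()]
--             j = i + 1
--             while j < len(lines):
--                 ns = lines[j].strip()
--                 if ns.startswith(('requires', 'ensures', 'decreases')):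
--                     sig_lines.append(lines[j].rstrip())
--                     j += 1
--                 else:
--                     break
--             sigs.append('\n'.join(sig_lines))
--             i = j
--         else:
--             i += 1
--     return '\n'.join(sigs) if sigs else '(none)'
-- ===== SOURCE B (Python) =====
-- def extract_lemma_signatures(program: str) -> str:
--     """Return a formatted string of every lemma signature in *program*."""
--     groups: list[list[str]] = []
--     collecting = False
--     for line in program.splitlines():
--         s = line.strip()
--         if s.startswith('lemma ') or s.startswith('lemma{'):
--             groups.append([line.rstrip()])
--             collecting = True
--         elif collecting and s.startswith(('requires', 'ensures', 'decreases')):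
--             groups[-1].append(line.rstrip())
--         else:
--             collecting = False
--     if not groups:
--         return '(none)'
--     return '\n'.join('\n'.join(g) for g in groups)
-- ===== Notes on version B (the rewrite author's own statement) =====
-- stated objective: simpler
-- what changed: Replaced A's nested while-loops with a skip-ahead cursor (i = j) by a single flat pass over the lines that keeps a boolean `collecting` flag and appends continuation lines to the last group.
import Mathlib
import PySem

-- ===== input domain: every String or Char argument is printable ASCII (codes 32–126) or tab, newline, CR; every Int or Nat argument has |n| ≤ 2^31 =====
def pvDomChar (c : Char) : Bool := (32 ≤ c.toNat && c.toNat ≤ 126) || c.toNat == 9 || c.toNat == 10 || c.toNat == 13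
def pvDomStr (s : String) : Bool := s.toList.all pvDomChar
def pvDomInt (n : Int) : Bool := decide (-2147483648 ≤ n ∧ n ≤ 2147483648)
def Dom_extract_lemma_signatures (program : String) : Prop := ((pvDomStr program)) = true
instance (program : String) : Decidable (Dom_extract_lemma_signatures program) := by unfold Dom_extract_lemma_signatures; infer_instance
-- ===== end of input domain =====

-- B replaces A's nested while-loop with skip-ahead cursor by a single flat fold holding a `collecting` flag (objective: simpler).

-- ===== PORT A =====
-- inner while loop of A: consume the maximal run of requires/ensures/decreases
-- lines; result = (the rstripped run, the remaining lines after it)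
def aInner : List String → List String × List String
  | [] => ([], [])
  | line :: rest =>
    let ns := PySem.Str.strip line
    if PySem.Str.startswith ns "requires" || PySem.Str.startswith ns "ensures" ||
       PySem.Str.startswith ns "decreases" then
      (PySem.Str.rstrip line :: (aInner rest).1, (aInner rest).2)
    else ([], line :: rest)

-- termination helper for the outer loop (the cursor only moves forward)
theorem aInner_len_le : ∀ (xs : List String), (aInner xs).2.length ≤ xs.length := by
  intro xs
  induction xs with
  | nil => simp [aInner]
  | cons line rest ih =>
    simp only [aInner]
    split
    · simpa using Nat.le_succ_of_le ih
    · simp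

-- outer while loop of A: the cursor `i`/`i = j` becomes recursion on the
-- remaining suffix of lines
def aOuter : List String → List String → List String
  | [], sigs => sigs
  | line :: rest, sigs =>
    let stripped := PySem.Str.strip line
    if PySem.Str.startswith stripped "lemma " || PySem.Str.startswith stripped "lemma{" then
      aOuter (aInner rest).2
        (sigs ++ [PySem.Str.join "\n" (PySem.Str.rstrip line :: (aInner rest).1)])
    else
      aOuter rest sigs
  termination_by l _ => l.length
  decreasing_by
  · exact Nat.lt_succ_of_le (aInner_len_le rest)
  · simp

def extract_lemma_signatures (program : String) : String :=
  let lines := PySem.Str.splitlines program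
  let sigs := aOuter lines []
  if sigs.isEmpty then "(none)" else PySem.Str.join "\n" sigs

-- ===== PORT B =====
-- one step of B's flat loop: state = (groups so far, collecting flag)
def bStep (st : List (List String) × Bool) (line : String) : List (List String) × Bool :=
  let s := PySem.Str.strip line
  if PySem.Str.startswith s "lemma " || PySem.Str.startswith s "lemma{" then
    (st.1 ++ [[PySem.Str.rstrip line]], true)
  else if st.2 && (PySem.Str.startswith s "requires" || PySem.Str.startswith s "ensures" ||
                   PySem.Str.startswith s "decreases") then
    -- groups[-1].append(line.rstrip())
    (st.1.dropLast ++ [st.1.getLastD [] ++ [PySem.Str.rstrip line]], st.2)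
  else
    (st.1, false)

def extract_lemma_signatures_alt (program : String) : String :=
  let st := (PySem.Str.splitlines program).foldl bStep ([], false)
  if st.1.isEmpty then "(none)"
  else PySem.Str.join "\n" (st.1.map (PySem.Str.join "\n"))

-- ===== PRECONDITION & SPEC =====
def Spec_extract_lemma_signatures (program : String) (out : String) : Prop := out = extract_lemma_signatures_alt program
instance (program : String) (out : String) : Decidable (Spec_extract_lemma_signatures program out) := by unfold Spec_extract_lemma_signatures; infer_instance

-- ===== CLAIM (what is proved, stated in full; the proofs are below) =====
def Claim_equal_extract_lemma_signatures : Prop := ∀ (program : String), Dom_extract_lemma_signatures program → Spec_extract_lemma_signatures program (extract_lemma_signatures program)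

-- ===== LEMMAS AND PROOFS =====

-- the two line tests, abbreviated for the proofs
def isCont (line : String) : Bool :=
  PySem.Str.startswith (PySem.Str.strip line) "requires" ||
  PySem.Str.startswith (PySem.Str.strip line) "ensures" ||
  PySem.Str.startswith (PySem.Str.strip line) "decreases"

def isLem (line : String) : Bool :=
  PySem.Str.startswith (PySem.Str.strip line) "lemma " ||
  PySem.Str.startswith (PySem.Str.strip line) "lemma{"

theorem aInner_cons (line : String) (rest : List String) :
    aInner (line :: rest)
      = if isCont line then (PySem.Str.rstrip line :: (aInner rest).1, (aInner rest).2)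
        else ([], line :: rest) := rfl

theorem bStep_eq (st : List (List String) × Bool) (line : String) :
    bStep st line
      = if isLem line then (st.1 ++ [[PySem.Str.rstrip line]], true)
        else if st.2 && isCont line then
          (st.1.dropLast ++ [st.1.getLastD [] ++ [PySem.Str.rstrip line]], st.2)
        else (st.1, false) := rfl

theorem aOuter_cons (line : String) (rest sigs : List String) :
    aOuter (line :: rest) sigs
      = if isLem line then
          aOuter (aInner rest).2
            (sigs ++ [PySem.Str.join "\n" (PySem.Str.rstrip line :: (aInner rest).1)])
        else aOuter rest sigs := by
  rw [aOuter]
  simp only [isLem]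
  rfl

-- a line cannot be both a lemma header and a requires/ensures/decreases line
theorem not_cont_of_lem (line : String) (hl : isLem line = true) : isCont line = false := by
  rw [Bool.eq_false_iff]
  intro hr
  simp only [isLem, isCont, PySem.Str.startswith_eq, Bool.or_eq_true,
    PySem.Chars.startswith_iff] at hl hr
  rcases hl with hl | hl <;> rcases hr with (hr | hr) | hr <;>
    rcases List.prefix_or_prefix_of_prefix hl hr with hp | hp <;> revert hp <;> decide

theorem aInner_stop (xs : List String) :
    (aInner xs).2 = [] ∨ isCont ((aInner xs).2.headD "") = false := by
  induction xs with
  | nil => left; rfl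
  | cons line rest ih =>
    rw [aInner_cons]
    by_cases h : isCont line = true
    · simpa [h] using ih
    · right
      simp only [Bool.not_eq_true] at h
      simp [h]

-- once the run has ended at a non-continuation line, the flag no longer matters
theorem foldl_flag_irrel (r : List String) (X : List (List String))
    (h : r = [] ∨ isCont (r.headD "") = false) :
    (r.foldl bStep (X, true)).1 = (r.foldl bStep (X, false)).1 := by
  cases r with
  | nil => rfl
  | cons line rest =>
    have hc : isCont line = false := by
      rcases h with h | h
      · simp at h
      · simpa using h
    have : bStep (X, true) line = bStep (X, false) line := by
      rw [bStep_eq, bStep_eq, hc]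
      simp
    simp only [List.foldl_cons, this]

-- B's fold, collecting into current group g, absorbs exactly A's inner run
theorem foldl_inner (xs : List String) : ∀ (groups : List (List String)) (g : List String),
    xs.foldl bStep (groups ++ [g], true)
      = (aInner xs).2.foldl bStep (groups ++ [g ++ (aInner xs).1], true) := by
  induction xs with
  | nil => intro groups g; simp [aInner]
  | cons line rest ih =>
    intro groups g
    rw [aInner_cons]
    by_cases h : isCont line = true
    · have hlf : isLem line = false := by
        rcases Bool.eq_false_or_eq_true (isLem line) with h' | h'
        · rw [not_cont_of_lem line h'] at h; exact absurd h (by simp)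
        · exact h'
      have hstep : bStep (groups ++ [g], true) line
          = (groups ++ [g ++ [PySem.Str.rstrip line]], true) := by
        rw [bStep_eq, hlf, h]
        simp
      simp only [h, if_true, List.foldl_cons, hstep, ih]
      simp
    · simp only [Bool.not_eq_true] at h
      simp [h]

-- main invariant: A's outer loop agrees with B's fold from a non-collecting state
theorem main_inv : ∀ (lines : List String) (groups : List (List String)),
    aOuter lines (groups.map (PySem.Str.join "\n"))
      = ((lines.foldl bStep (groups, false)).1).map (PySem.Str.join "\n")
  | [], groups => by simp [aOuter]
  | line :: rest, groups => by
    rw [aOuter_cons]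
    by_cases hl : isLem line = true
    · have hstep : bStep (groups, false) line = (groups ++ [[PySem.Str.rstrip line]], true) := by
        rw [bStep_eq, hl]; simp
      have h1 := foldl_inner rest groups [PySem.Str.rstrip line]
      have h2 := foldl_flag_irrel (aInner rest).2
        (groups ++ [[PySem.Str.rstrip line] ++ (aInner rest).1]) (aInner_stop rest)
      have h3 := main_inv (aInner rest).2 (groups ++ [PySem.Str.rstrip line :: (aInner rest).1])
      have hmap : groups.map (PySem.Str.join "\n") ++
            [PySem.Str.join "\n" (PySem.Str.rstrip line :: (aInner rest).1)]
          = (groups ++ [PySem.Str.rstrip line :: (aInner rest).1]).map (PySem.Str.join "\n") := by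
        simp
      simp only [hl, if_true, List.foldl_cons, hstep, hmap, h3]
      simp only [List.singleton_append] at h1 h2
      rw [congrArg Prod.fst h1, h2]
    · have hstep : bStep (groups, false) line = (groups, false) := by
        rw [bStep_eq]
        simp [hl]
      simp only [hl, List.foldl_cons, hstep]
      exact main_inv rest groups
  termination_by lines _ => lines.length
  decreasing_by
  · exact Nat.lt_succ_of_le (aInner_len_le rest)
  · simp

-- ===== VERDICT (by name: the statement is the Claim_ definition above) =====
theorem extract_lemma_signatures_spec : Claim_equal_extract_lemma_signatures := by
  intro program _
  unfold Spec_extract_lemma_signatures extract_lemma_signatures extract_lemma_signatures_alt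
  have h := main_inv (PySem.Str.splitlines program) []
  simp only [List.map_nil] at h
  dsimp only
  rw [h]
  simp [List.isEmpty_iff]
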